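-- pv_equiv track=rewrite | github.com/seequest/Learning | Code-lab/cover_points/Solution.py | cover_points
-- ===== SOURCE A (Python) =====
-- from typing import List, Sequence, Tuple
--
-- def cover_points(x: Sequence[int], y: Sequence[int]) -> List[Tuple[int, int]]:
--
--     if len(x) != len(y):
--         raise ValueError('expected len(x) == len(y)')
--
--     moves: List[Tuple[int, int]] = []
--
--     for i in range(0, len(x) - 1):
--
--         distance = (x[i + 1] - x[i], y[i + 1] - y[i])
--
--         if distance == (0, 0):
--             continue
--
--         delta = distance[0] - distance[1]
--
--         if delta > 0:
--             # we're moving farther along the x axis than the y axis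
--             moves.extend(
--                 [
--                     (-1 if distance[0] < 0 else 1, -1 if distance[1] < 0 else 1)
--                 ] * abs(distance[1]) + [
--                     (-1 if distance[0] < 0 else 1, 0)
--                 ] * abs(delta)
--             )
--         elif delta == 0:
--             # we're moving the same distance along the x and y axis
--             moves.extend((
--                 [
--                     (-1 if distance[0] < 0 else 1, -1 if distance[1] < 0 else 1)
--                 ] * abs(distance[0])
--             ))
--         else:
--             # we're moving farther along the y axis than the x axis
--             moves.extend((
--                 [
--                     (-1 if distance[0] < 0 else 1, -1 if distance[1] < 0 else 1)
--                 ] * abs(distance[0]) + [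
--                     (0, -1 if distance[1] < 0 else 1)
--                 ] * abs(delta)
--             ))
--
--     return moves
-- ===== SOURCE B (Python) =====
-- from typing import List, Sequence, Tuple
--
-- def cover_points(x: Sequence[int], y: Sequence[int]) -> List[Tuple[int, int]]:
--     if len(x) != len(y):
--         raise ValueError('expected len(x) == len(y)')
--
--     def seg(dx: int, dy: int) -> List[Tuple[int, int]]:
--         sx = -1 if dx < 0 else 1
--         sy = -1 if dy < 0 else 1
--         delta = dx - dy
--         diag = abs(dy) if delta > 0 else abs(dx)
--         tail = (sx, 0) if delta > 0 else (0, sy)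
--         return [(sx, sy) if k < diag else tail for k in range(diag + abs(delta))]
--
--     def go(xs: List[int], ys: List[int]) -> List[Tuple[int, int]]:
--         if len(xs) < 2:
--             return []
--         return seg(xs[1] - xs[0], ys[1] - ys[0]) + go(xs[1:], ys[1:])
--
--     return go(list(x), list(y))
-- ===== Notes on version B (the rewrite author's own statement) =====
-- stated objective: alternative
-- what changed: Replaces A's index loop with three-way branching list-multiplication by a recursion on the list tails whose per-segment moves are produced by a single indexed comprehension selecting diagonal vs straight step by position (k < diag), with only a two-way branch on delta>0.
import Mathlib
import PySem

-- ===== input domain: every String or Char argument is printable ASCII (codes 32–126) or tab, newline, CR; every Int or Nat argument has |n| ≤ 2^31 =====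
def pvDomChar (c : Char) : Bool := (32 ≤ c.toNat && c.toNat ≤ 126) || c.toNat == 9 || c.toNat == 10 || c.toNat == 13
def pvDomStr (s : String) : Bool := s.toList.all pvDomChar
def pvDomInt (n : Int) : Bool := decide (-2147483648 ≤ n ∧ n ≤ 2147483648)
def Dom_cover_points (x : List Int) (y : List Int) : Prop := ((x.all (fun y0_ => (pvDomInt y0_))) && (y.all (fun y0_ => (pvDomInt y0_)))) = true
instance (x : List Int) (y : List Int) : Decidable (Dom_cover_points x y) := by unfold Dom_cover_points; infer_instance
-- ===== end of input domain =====

-- B recurses on the list tails and builds each segment with one indexed comprehension; equal return values proved on Pre_ (A raises ValueError when len(x) != len(y)).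

-- ===== PORT A =====
def cover_points (x : List Int) (y : List Int) : List (Int × Int) :=
  if x.length ≠ y.length then []   -- Python raises ValueError here; excluded by Pre_
  else
    (PySem.List.pyRange 0 ((x.length : Int) - 1) 1).foldl (fun moves i =>
      let dx := PySem.List.pyGetD x (i + 1) 0 - PySem.List.pyGetD x i 0
      let dy := PySem.List.pyGetD y (i + 1) 0 - PySem.List.pyGetD y i 0
      if dx = 0 ∧ dy = 0 then moves
      else
        let delta := dx - dy
        if delta > 0 then
          moves ++ (List.replicate dy.natAbs ((if dx < 0 then -1 else 1 : Int), (if dy < 0 then -1 else 1 : Int))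
                    ++ List.replicate delta.natAbs ((if dx < 0 then -1 else 1 : Int), (0 : Int)))
        else if delta = 0 then
          moves ++ List.replicate dx.natAbs ((if dx < 0 then -1 else 1 : Int), (if dy < 0 then -1 else 1 : Int))
        else
          moves ++ (List.replicate dx.natAbs ((if dx < 0 then -1 else 1 : Int), (if dy < 0 then -1 else 1 : Int))
                    ++ List.replicate delta.natAbs ((0 : Int), (if dy < 0 then -1 else 1 : Int)))) []

-- ===== PORT B =====
-- Source B's 'seg': one comprehension over range(diag + abs(delta)), selecting by position
-- (Source B's locals sx, sy, delta, diag, tail are inlined as their defining expressions)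
def segB (dx dy : Int) : List (Int × Int) :=
  (PySem.List.pyRange 0 ((if dx - dy > 0 then |dy| else |dx|) + |dx - dy|) 1).map
    (fun k =>
      if k < (if dx - dy > 0 then |dy| else |dx|) then
        ((if dx < 0 then (-1 : Int) else 1), (if dy < 0 then (-1 : Int) else 1))
      else if dx - dy > 0 then ((if dx < 0 then (-1 : Int) else 1), (0 : Int))
      else ((0 : Int), (if dy < 0 then (-1 : Int) else 1)))

-- Source B's 'go': recursion on the tails (Python tests len(xs) < 2 and slices; with equal
-- lengths — guaranteed by Pre_ — the two-list pattern below is the same test)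
def goB : List Int → List Int → List (Int × Int)
  | x0 :: x1 :: xs, y0 :: y1 :: ys => segB (x1 - x0) (y1 - y0) ++ goB (x1 :: xs) (y1 :: ys)
  | _, _ => []

def cover_points_alt (x : List Int) (y : List Int) : List (Int × Int) :=
  if x.length ≠ y.length then []   -- Source B raises ValueError here; excluded by Pre_
  else goB x y

-- ===== PRECONDITION & SPEC =====
-- A raises ValueError exactly when the lists have different lengths; Pre_ excludes that.
def Pre_cover_points (x : List Int) (y : List Int) : Prop := x.length = y.length
instance (x : List Int) (y : List Int) : Decidable (Pre_cover_points x y) := by unfold Pre_cover_points; infer_instance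
def pvWitness_cover_points : List Int × List Int := ([0, 2, 1], [0, -1, 3])

def Spec_cover_points (x : List Int) (y : List Int) (out : List (Int × Int)) : Prop := out = cover_points_alt x y
instance (x : List Int) (y : List Int) (out : List (Int × Int)) : Decidable (Spec_cover_points x y out) := by unfold Spec_cover_points; infer_instance

-- ===== CLAIM (what is proved, stated in full; the proofs are below) =====
def Claim_equal_cover_points : Prop := ∀ (x : List Int) (y : List Int), Dom_cover_points x y → Pre_cover_points x y → Spec_cover_points x y (cover_points x y)

-- ===== LEMMAS AND PROOFS =====

-- proof-only: A's per-segment list (the 'continue' case as [])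
def segA (dx dy : Int) : List (Int × Int) :=
  if dx = 0 ∧ dy = 0 then []
  else if dx - dy > 0 then
    List.replicate dy.natAbs ((if dx < 0 then -1 else 1 : Int), (if dy < 0 then -1 else 1 : Int))
      ++ List.replicate (dx - dy).natAbs ((if dx < 0 then -1 else 1 : Int), (0 : Int))
  else if dx - dy = 0 then
    List.replicate dx.natAbs ((if dx < 0 then -1 else 1 : Int), (if dy < 0 then -1 else 1 : Int))
  else
    List.replicate dx.natAbs ((if dx < 0 then -1 else 1 : Int), (if dy < 0 then -1 else 1 : Int))
      ++ List.replicate (dx - dy).natAbs ((0 : Int), (if dy < 0 then -1 else 1 : Int))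

-- a position-selecting comprehension is a pair of replicates
theorem map_ite_pyRange (a n : Int) (u v : Int × Int) (h0 : 0 ≤ a) (h1 : a ≤ n) :
    (PySem.List.pyRange 0 n 1).map (fun k => if k < a then u else v) =
      List.replicate a.toNat u ++ List.replicate (n - a).toNat v := by
  apply List.ext_getElem
  · simp [PySem.List.length_pyRange_one]; omega
  · intro k hk1 hk2
    have hkn : k < n.toNat := by simpa [PySem.List.length_pyRange_one] using hk1
    simp only [List.getElem_map, PySem.List.getElem_pyRange_one, zero_add]
    rcases Nat.lt_or_ge k a.toNat with h | h
    · rw [if_pos (by omega), List.getElem_append_left (by simpa using h), List.getElem_replicate]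
    · rw [if_neg (by omega), List.getElem_append_right (by simpa using h), List.getElem_replicate]

theorem segA_eq_segB (dx dy : Int) : segA dx dy = segB dx dy := by
  by_cases h0 : dx = 0 ∧ dy = 0
  · obtain ⟨h1, h2⟩ := h0
    subst h1; subst h2; decide
  · unfold segA segB
    rw [if_neg h0]
    rcases lt_trichotomy (dx - dy) 0 with hlt | heq | hgt
    · rw [if_neg (by omega : ¬ dx - dy > 0), if_neg (by omega : ¬ dx - dy = 0)]
      simp only [if_neg (by omega : ¬ dx - dy > 0)]
      rw [map_ite_pyRange _ _ _ _ (abs_nonneg dx) (le_add_of_nonneg_right (abs_nonneg _))]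
      simp only [Int.abs_eq_natAbs]
      congr 2 <;> omega
    · rw [if_neg (by omega : ¬ dx - dy > 0), if_pos heq]
      simp only [if_neg (by omega : ¬ dx - dy > 0)]
      rw [map_ite_pyRange _ _ _ _ (abs_nonneg dx) (le_add_of_nonneg_right (abs_nonneg _))]
      simp only [Int.abs_eq_natAbs]
      have h2 : ((dx.natAbs : Int) + ((dx - dy).natAbs : Int) - (dx.natAbs : Int)).toNat = 0 := by omega
      rw [h2]
      simp only [List.replicate_zero, List.append_nil]
      congr 1
    · rw [if_pos hgt]
      simp only [if_pos hgt]
      rw [map_ite_pyRange _ _ _ _ (abs_nonneg dy) (le_add_of_nonneg_right (abs_nonneg _))]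
      simp only [Int.abs_eq_natAbs]
      congr 2 <;> omega

-- Source B's recursion as a flatMap over consecutive pairs
theorem goB_eq_flatMap (x y : List Int) :
    goB x y = ((x.zip y).zip ((x.drop 1).zip (y.drop 1))).flatMap
      (fun pq => segB (pq.2.1 - pq.1.1) (pq.2.2 - pq.1.2)) := by
  induction x generalizing y with
  | nil => cases y <;> simp [goB]
  | cons x0 xt ih =>
    cases y with
    | nil => cases xt <;> simp [goB]
    | cons y0 yt =>
      cases xt with
      | nil => cases yt <;> simp [goB]
      | cons x1 xs =>
        cases yt with
        | nil => simp [goB]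
        | cons y1 ys =>
          simp only [goB, List.zip_cons_cons, List.drop_succ_cons, List.drop_zero,
            List.flatMap_cons]
          rw [ih (y1 :: ys)]
          simp

-- the index loop reads exactly the consecutive quadruples (x_i, x_{i+1}, y_i, y_{i+1})
theorem quads_eq (x y : List Int) (h : x.length = y.length) :
    (PySem.List.pyRange 0 ((x.length : Int) - 1) 1).map
      (fun i => (PySem.List.pyGetD x i 0, PySem.List.pyGetD x (i + 1) 0,
                 PySem.List.pyGetD y i 0, PySem.List.pyGetD y (i + 1) 0)) =
    ((x.zip y).zip ((x.drop 1).zip (y.drop 1))).map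
      (fun pq => (pq.1.1, pq.2.1, pq.1.2, pq.2.2)) := by
  apply List.ext_getElem
  · simp [PySem.List.length_pyRange_one, h]
  · intro k h1 h2
    have hk : k < x.length - 1 := by
      simpa [PySem.List.length_pyRange_one] using h1
    have hkx : k < x.length := by omega
    have hky : k < y.length := by omega
    have hk1x : k + 1 < x.length := by omega
    have hk1y : k + 1 < y.length := by omega
    simp only [List.getElem_map, PySem.List.getElem_pyRange_one, zero_add]
    have g1 : PySem.List.pyGetD x ((k : Int)) 0 = x[k] := by
      rw [PySem.List.pyGetD_eq_getElem] <;> simp <;> omega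
    have g2 : PySem.List.pyGetD x ((k : Int) + 1) 0 = x[k + 1] := by
      have : ((k : Int) + 1) = ((k + 1 : Nat) : Int) := by push_cast; ring
      rw [this, PySem.List.pyGetD_eq_getElem] <;> simp <;> omega
    have g3 : PySem.List.pyGetD y ((k : Int)) 0 = y[k] := by
      rw [PySem.List.pyGetD_eq_getElem] <;> simp <;> omega
    have g4 : PySem.List.pyGetD y ((k : Int) + 1) 0 = y[k + 1] := by
      have : ((k : Int) + 1) = ((k + 1 : Nat) : Int) := by push_cast; ring
      rw [this, PySem.List.pyGetD_eq_getElem] <;> simp <;> omega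
    rw [g1, g2, g3, g4]
    simp [List.getElem_zip]

-- A's loop body appends segA of the quadruple
theorem bodyA_eq (m : List (Int × Int)) (dx dy : Int) :
    (if dx = 0 ∧ dy = 0 then m
     else if dx - dy > 0 then
       m ++ (List.replicate dy.natAbs ((if dx < 0 then -1 else 1 : Int), (if dy < 0 then -1 else 1 : Int))
             ++ List.replicate (dx - dy).natAbs ((if dx < 0 then -1 else 1 : Int), (0 : Int)))
     else if dx - dy = 0 then
       m ++ List.replicate dx.natAbs ((if dx < 0 then -1 else 1 : Int), (if dy < 0 then -1 else 1 : Int))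
     else
       m ++ (List.replicate dx.natAbs ((if dx < 0 then -1 else 1 : Int), (if dy < 0 then -1 else 1 : Int))
             ++ List.replicate (dx - dy).natAbs ((0 : Int), (if dy < 0 then -1 else 1 : Int)))) =
    m ++ segA dx dy := by
  unfold segA
  split_ifs <;> simp

-- ===== VERDICT (by name: the statement is the Claim_ definition above) =====
theorem cover_points_spec : Claim_equal_cover_points := by
  intro x y _ hpre
  have hlen : x.length = y.length := hpre
  unfold Spec_cover_points cover_points cover_points_alt
  rw [if_neg (by simpa using hlen), if_neg (by simpa using hlen)]
  have hbody : (fun (moves : List (Int × Int)) (i : Int) =>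
      let dx := PySem.List.pyGetD x (i + 1) 0 - PySem.List.pyGetD x i 0
      let dy := PySem.List.pyGetD y (i + 1) 0 - PySem.List.pyGetD y i 0
      if dx = 0 ∧ dy = 0 then moves
      else
        let delta := dx - dy
        if delta > 0 then
          moves ++ (List.replicate dy.natAbs ((if dx < 0 then -1 else 1 : Int), (if dy < 0 then -1 else 1 : Int))
                    ++ List.replicate delta.natAbs ((if dx < 0 then -1 else 1 : Int), (0 : Int)))
        else if delta = 0 then
          moves ++ List.replicate dx.natAbs ((if dx < 0 then -1 else 1 : Int), (if dy < 0 then -1 else 1 : Int))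
        else
          moves ++ (List.replicate dx.natAbs ((if dx < 0 then -1 else 1 : Int), (if dy < 0 then -1 else 1 : Int))
                    ++ List.replicate delta.natAbs ((0 : Int), (if dy < 0 then -1 else 1 : Int)))) =
      (fun moves i => moves ++ segA (PySem.List.pyGetD x (i + 1) 0 - PySem.List.pyGetD x i 0)
                                    (PySem.List.pyGetD y (i + 1) 0 - PySem.List.pyGetD y i 0)) := by
    funext m i
    exact bodyA_eq m _ _
  rw [hbody, PySem.List.foldl_append_eq_flatMap, goB_eq_flatMap]
  have : (PySem.List.pyRange 0 ((x.length : Int) - 1) 1).flatMap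
      (fun i => segA (PySem.List.pyGetD x (i + 1) 0 - PySem.List.pyGetD x i 0)
                     (PySem.List.pyGetD y (i + 1) 0 - PySem.List.pyGetD y i 0)) =
      ((PySem.List.pyRange 0 ((x.length : Int) - 1) 1).map
        (fun i => (PySem.List.pyGetD x i 0, PySem.List.pyGetD x (i + 1) 0,
                   PySem.List.pyGetD y i 0, PySem.List.pyGetD y (i + 1) 0))).flatMap
        (fun q => segA (q.2.1 - q.1) (q.2.2.2 - q.2.2.1)) := by
    rw [List.flatMap_map]
  rw [List.nil_append, this, quads_eq x y hlen, List.flatMap_map]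
  refine List.flatMap_congr ?_
  intro pq _
  exact segA_eq_segB _ _
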